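-- pv_equiv track=rewrite | github.com/alli959/Kattis | An I for an Eye/Eye.py | fixer
-- ===== SOURCE A (Python) =====
-- wordDict = {
--     "at": "@",
--     "and": "&",
--     "one": "1",
--     "won": "1",
--     "too": "2",
--     "to": "2",
--     "two": "2",
--     "for": "4",
--     "four": "4",
--     "bea": "b",
--     "bee": "b",
--     "be": "b",
--     "sea": "c",
--     "see": "c",
--     "eye": "i",
--     "oh": "o",
--     "owe": "o",
--     "are": "r",
--     "you": "u",
--     "why": "y",
-- }
--
-- def fixer(stri):
--     strin = stri.lower()
--
--     i = 0
--     returnstr = ""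
--     isBreak = False
--     changeValue = ""
--     changeStart = -1
--     changeEnd = -1
--
--     while i < len(strin):
--         value = ""
--         for key, value in wordDict.items():
--             if len(strin[i:]) >= len(key):
--                 if strin[i:i+len(key)] == key:
--                     returnstr += value
--                     changeValue = value
--                     changeStart = i
--                     changeEnd = i+len(key)
--                     isBreak = True
--                     break
--         if isBreak:
--             newstr = strin[:changeStart] + changeValue + strin[changeEnd:]
--             strin = newstr
--             changeStart = -1
--             changeEnd = -1
--             changeValue = ""
--             i += 1
--             isBreak = False
--         else:
--             returnstr += strin[i]
--             i += 1
--
--     returnstr = returnstr.capitalize()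
--     return returnstr
-- ===== SOURCE B (Python) =====
-- wordDict = {
--     "at": "@",
--     "and": "&",
--     "one": "1",
--     "won": "1",
--     "too": "2",
--     "to": "2",
--     "two": "2",
--     "for": "4",
--     "four": "4",
--     "bea": "b",
--     "bee": "b",
--     "be": "b",
--     "sea": "c",
--     "see": "c",
--     "eye": "i",
--     "oh": "o",
--     "owe": "o",
--     "are": "r",
--     "you": "u",
--     "why": "y",
-- }
--
-- def fixer(stri):
--     out = []
--     rest = stri.lower()
--     while rest:
--         for key, value in wordDict.items():
--             if rest.startswith(key):
--                 out.append(value)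
--                 rest = rest[len(key):]
--                 break
--         else:
--             out.append(rest[0])
--             rest = rest[1:]
--     return "".join(out).capitalize()
-- ===== Notes on version B (the rewrite author's own statement) =====
-- stated objective: faster
-- what changed: Instead of rebuilding the whole string after every replacement and indexing into the mutated copy, B does a single greedy scan over the immutable lowered string, consuming a matched key in one jump and collecting output pieces in a list joined once at the end.
import Mathlib
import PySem

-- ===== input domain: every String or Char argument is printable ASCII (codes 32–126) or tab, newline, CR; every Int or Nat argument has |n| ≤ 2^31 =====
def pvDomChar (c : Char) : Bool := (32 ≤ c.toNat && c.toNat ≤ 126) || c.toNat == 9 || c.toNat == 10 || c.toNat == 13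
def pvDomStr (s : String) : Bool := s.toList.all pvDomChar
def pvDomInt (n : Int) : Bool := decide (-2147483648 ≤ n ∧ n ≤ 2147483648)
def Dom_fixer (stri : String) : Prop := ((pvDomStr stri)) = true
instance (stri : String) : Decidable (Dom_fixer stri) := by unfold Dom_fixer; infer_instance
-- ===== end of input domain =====

-- B replaces A's rebuild-the-string-after-every-match loop by a single greedy scan over the
-- immutable lowered string that jumps over each matched key (objective: faster).

-- ===== PORT A =====
-- the module-level wordDict, in insertion order (values kept as strings, as in the Python)
def pvDictA : List (List Char × List Char) :=
  [(['a','t'], ['@']), (['a','n','d'], ['&']), (['o','n','e'], ['1']),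
   (['w','o','n'], ['1']), (['t','o','o'], ['2']), (['t','o'], ['2']),
   (['t','w','o'], ['2']), (['f','o','r'], ['4']), (['f','o','u','r'], ['4']),
   (['b','e','a'], ['b']), (['b','e','e'], ['b']), (['b','e'], ['b']),
   (['s','e','a'], ['c']), (['s','e','e'], ['c']), (['e','y','e'], ['i']),
   (['o','h'], ['o']), (['o','w','e'], ['o']), (['a','r','e'], ['r']),
   (['y','o','u'], ['u']), (['w','h','y'], ['y'])]

-- s.capitalize() = first char uppercased, the rest lowered (exact on the ASCII domain); both Pythons call it
def pvCapitalize (s : List Char) : List Char :=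
  match s with
  | [] => []
  | c :: rest => PySem.Chars.upperChar c :: PySem.Chars.lower rest

-- A's inner `for key, value in wordDict.items(): …` with its length test and slice comparison
def pvFindA (strin : List Char) (i : Nat) : List (List Char × List Char) → Option (List Char × List Char)
  | [] => none
  | (key, value) :: restDict =>
      if (PySem.List.slice strin (some (i : Int)) none).length ≥ key.length then
        if PySem.List.slice strin (some (i : Int)) (some ((i : Int) + (key.length : Int))) == key then
          some (key, value)
        else pvFindA strin i restDict
      else pvFindA strin i restDict

-- facts the loops' termination measures need (cited in decreasing_by)
theorem pvFindA_mem (strin : List Char) (i : Nat) (d : List (List Char × List Char))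
    (p : List Char × List Char) (h : pvFindA strin i d = some p) : p ∈ d := by
  induction d with
  | nil => simp [pvFindA] at h
  | cons q r ih =>
      obtain ⟨key, value⟩ := q
      simp only [pvFindA] at h
      split_ifs at h with h1 h2
      · obtain rfl := Option.some.inj h
        simp
      · exact List.mem_cons_of_mem _ (ih h)
      · exact List.mem_cons_of_mem _ (ih h)

theorem pvDictA_shape : ∀ p ∈ pvDictA, p.2.length = 1 ∧ 2 ≤ p.1.length := by decide

-- A's `while i < len(strin): …` loop; state = (strin, i, returnstr)
def pvLoopA (strin : List Char) (i : Nat) (returnstr : List Char) : List Char :=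
  if h : i < strin.length then
    match hm : pvFindA strin i pvDictA with
    | some (key, value) =>
        -- returnstr += value; strin = strin[:i] + value + strin[i+len(key):]; i += 1
        pvLoopA (PySem.List.slice strin none (some (i : Int)) ++ value ++
            PySem.List.slice strin (some ((i : Int) + (key.length : Int))) none)
          (i + 1) (returnstr ++ value)
    | none =>
        -- returnstr += strin[i]; i += 1
        pvLoopA strin (i + 1) (returnstr ++ [strin[i]])
  else returnstr
termination_by strin.length - i
decreasing_by
  · obtain ⟨hv, hk⟩ := pvDictA_shape _ (pvFindA_mem strin i pvDictA _ hm)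
    have hv' : value.length = 1 := hv
    have hk' : 2 ≤ key.length := hk
    have h1 : (PySem.List.slice strin none (some (i : Int))).length = i := by
      rw [PySem.List.slice_to_natCast]; simp [List.length_take]; omega
    have h2 : (PySem.List.slice strin (some ((i : Int) + (key.length : Int))) none).length
        = strin.length - (i + key.length) := by
      have hc : (i : Int) + (key.length : Int) = ((i + key.length : Nat) : Int) := by push_cast; ring
      rw [hc, PySem.List.slice_from_natCast]; simp
    simp only [List.length_append, h1, h2, hv']
    omega
  · omega

def fixer (stri : String) : String :=
  String.ofList (pvCapitalize (pvLoopA (PySem.Chars.lower stri.toList) 0 []))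

-- ===== PORT B =====
def pvDictB : List (List Char × List Char) := pvDictA

-- B's inner loop: the first dict entry whose key is a prefix of the remaining text
def pvFindB (rest : List Char) : List (List Char × List Char) → Option (List Char × List Char)
  | [] => none
  | (key, value) :: restDict =>
      if key.isPrefixOf rest then some (key, value) else pvFindB rest restDict

theorem pvFindB_mem (rest : List Char) (d : List (List Char × List Char))
    (p : List Char × List Char) (h : pvFindB rest d = some p) : p ∈ d := by
  induction d with
  | nil => simp [pvFindB] at h
  | cons q r ih =>
      obtain ⟨key, value⟩ := q
      simp only [pvFindB] at h
      split_ifs at h with h1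
      · obtain rfl := Option.some.inj h
        simp
      · exact List.mem_cons_of_mem _ (ih h)

-- B's `while rest: …` loop, collecting the pieces appended to `out`
def pvScanB (rest : List Char) : List (List Char) :=
  if h : rest ≠ [] then
    match hm : pvFindB rest pvDictB with
    | some (key, value) => value :: pvScanB (rest.drop key.length)
    | none => [rest.head h] :: pvScanB rest.tail
  else []
termination_by rest.length
decreasing_by
  · obtain ⟨hv, hk⟩ := pvDictA_shape _ (pvFindB_mem rest pvDictB _ hm)
    have hk' : 2 ≤ key.length := hk
    have hpos : 0 < rest.length := List.length_pos_iff.mpr h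
    simp only [List.length_drop]
    omega
  · have hpos : 0 < rest.length := List.length_pos_iff.mpr h
    simp only [List.length_tail]
    omega

def fixer_alt (stri : String) : String :=
  String.ofList (pvCapitalize (PySem.Chars.join [] (pvScanB (PySem.Chars.lower stri.toList))))

-- ===== PRECONDITION & SPEC =====
def Spec_fixer (stri : String) (out : String) : Prop := out = fixer_alt stri
instance (stri : String) (out : String) : Decidable (Spec_fixer stri out) := by unfold Spec_fixer; infer_instance

-- ===== CLAIM (what is proved, stated in full; the proofs are below) =====
def Claim_equal_fixer : Prop := ∀ (stri : String), Dom_fixer stri → Spec_fixer stri (fixer stri)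

-- ===== LEMMAS AND PROOFS =====

-- "".join(out) is List.flatten
theorem pvJoin_flatten (l : List (List Char)) : PySem.Chars.join [] l = l.flatten := by
  induction l with
  | nil => rfl
  | cons a t ih =>
      cases t with
      | nil => simp [PySem.Chars.join_singleton]
      | cons b t2 => rw [PySem.Chars.join_cons_cons]; simp [ih]

-- A's dict search at position |done| of done ++ rest is B's prefix search on rest
theorem pvFind_agree (done rest : List Char) (d : List (List Char × List Char)) :
    pvFindA (done ++ rest) done.length d = pvFindB rest d := by
  induction d with
  | nil => rfl
  | cons p r ih =>
      obtain ⟨key, value⟩ := p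
      simp only [pvFindA, pvFindB]
      have h1 : PySem.List.slice (done ++ rest) (some ((done.length : Nat) : Int)) none = rest := by
        rw [PySem.List.slice_from_natCast]; exact List.drop_left
      have h2 : PySem.List.slice (done ++ rest) (some ((done.length : Nat) : Int))
          (some (((done.length : Nat) : Int) + ((key.length : Nat) : Int))) = rest.take key.length := by
        rw [PySem.List.slice_natCast_add, List.drop_left]
      rw [h1, h2]
      by_cases hp : key.isPrefixOf rest
      · have hpre : key <+: rest := List.isPrefixOf_iff_prefix.mp hp
        have htake : rest.take key.length = key := (List.prefix_iff_eq_take.mp hpre).symm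
        have hlen : key.length ≤ rest.length := hpre.length_le
        simp [hp, htake, hlen]
      · have hne : (rest.take key.length == key) = false := beq_eq_false_iff_ne.mpr fun hEq =>
          hp (List.isPrefixOf_iff_prefix.mpr (List.prefix_iff_eq_take.mpr hEq.symm))
        simp [hne, hp, ih]

-- unfolding equations for pvScanB
theorem pvScanB_some (rest : List Char) (h : rest ≠ []) (key value : List Char)
    (hm : pvFindB rest pvDictB = some (key, value)) :
    pvScanB rest = value :: pvScanB (rest.drop key.length) := by
  rw [pvScanB, dif_pos h]
  split
  · rename_i k v heq
    obtain ⟨rfl, rfl⟩ : key = k ∧ value = v := by simpa using hm.symm.trans heq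
    rfl
  · rename_i heq
    rw [hm] at heq
    cases heq

theorem pvScanB_none (rest : List Char) (h : rest ≠ [])
    (hm : pvFindB rest pvDictB = none) :
    pvScanB rest = [rest.head h] :: pvScanB rest.tail := by
  rw [pvScanB, dif_pos h]
  split
  · rename_i k v heq
    rw [hm] at heq
    cases heq
  · rfl

-- the invariant: A's loop at position |done| of done ++ rest just appends B's scan of rest
theorem pvLoop_scan (n : Nat) : ∀ (rest : List Char), rest.length ≤ n → ∀ (done ret : List Char),
    pvLoopA (done ++ rest) done.length ret = ret ++ (pvScanB rest).flatten := by
  induction n with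
  | zero =>
      intro rest hr done ret
      obtain rfl : rest = [] := List.eq_nil_of_length_eq_zero (Nat.le_zero.mp hr)
      rw [pvLoopA, pvScanB]
      simp
  | succ n ih =>
      intro rest hr done ret
      match rest with
      | [] =>
          rw [pvLoopA, pvScanB]
          simp
      | c :: rest0 =>
          have hlt : done.length < (done ++ c :: rest0).length := by simp
          rw [pvLoopA, dif_pos hlt]
          have hag := pvFind_agree done (c :: rest0) pvDictA
          split
          · rename_i key value heq
            have hB : pvFindB (c :: rest0) pvDictB = some (key, value) := hag ▸ heq
            obtain ⟨hv, hk⟩ := pvDictA_shape _ (pvFindB_mem _ pvDictB _ hB)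
            have hv' : value.length = 1 := hv
            have hk' : 2 ≤ key.length := hk
            have harg : PySem.List.slice (done ++ c :: rest0) none (some ((done.length : Nat) : Int)) ++ value ++
                PySem.List.slice (done ++ c :: rest0)
                  (some (((done.length : Nat) : Int) + ((key.length : Nat) : Int))) none
                = (done ++ value) ++ (c :: rest0).drop key.length := by
              have hc : ((done.length : Nat) : Int) + ((key.length : Nat) : Int)
                  = ((done.length + key.length : Nat) : Int) := by push_cast; ring
              rw [PySem.List.slice_to_natCast, hc, PySem.List.slice_from_natCast,
                List.take_left, List.drop_append]
              simp [List.append_assoc]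
            rw [harg]
            have hlen2 : done.length + 1 = (done ++ value).length := by simp [hv']
            rw [hlen2]
            have hle : ((c :: rest0).drop key.length).length ≤ n := by
              simp only [List.length_drop, List.length_cons]
              simp only [List.length_cons] at hr
              omega
            rw [ih ((c :: rest0).drop key.length) hle (done ++ value) (ret ++ value)]
            rw [pvScanB_some (c :: rest0) (by simp) key value hB]
            simp [List.append_assoc]
          · rename_i heq
            have hB : pvFindB (c :: rest0) pvDictB = none := hag ▸ heq
            have hget : (done ++ c :: rest0)[done.length]'hlt = c := by simp
            rw [hget]
            have hsplit : done ++ c :: rest0 = (done ++ [c]) ++ rest0 := by simp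
            have hlen2 : done.length + 1 = (done ++ [c]).length := by simp
            rw [hsplit, hlen2]
            rw [ih rest0 (by simp at hr; omega) (done ++ [c]) (ret ++ [c])]
            rw [pvScanB_none (c :: rest0) (by simp) hB]
            simp [List.append_assoc]

-- ===== VERDICT (by name: the statement is the Claim_ definition above) =====
theorem fixer_spec : Claim_equal_fixer := by
  intro stri _hdom
  show fixer stri = fixer_alt stri
  unfold fixer fixer_alt
  have h2 : pvLoopA (PySem.Chars.lower stri.toList) 0 []
      = (pvScanB (PySem.Chars.lower stri.toList)).flatten := by
    simpa using pvLoop_scan (PySem.Chars.lower stri.toList).length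
      (PySem.Chars.lower stri.toList) le_rfl [] []
  rw [h2, pvJoin_flatten]
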